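-- pv_equiv track=rewrite | github.com/feirik/Writeups | guessing_game_4/solve.py | make_list_fifth
-- ===== SOURCE A (Python) =====
-- def make_list_fifth(false_count_list):
--     zero_false_list = []
--     one_false_list = []
--     two_false_list = []
--     three_false_list = []
--
--     iter = 0
--     for i in false_count_list:
--         if i == 0:
--             zero_false_list.append(iter)
--         if i == 1:
--             one_false_list.append(iter)
--         if i == 2:
--             two_false_list.append(iter)
--         if i == 3:
--             three_false_list.append(iter)
--         iter += 1
--
--     remove_zero = zero_false_list[0:128]
--     remove_one = one_false_list[:512]
--     remove_two = two_false_list[:768]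
--     remove_three = three_false_list[:512]
--
--     test_list = remove_zero + remove_one + remove_two + remove_three
--
--     return test_list
-- ===== SOURCE B (Python) =====
-- def _cap(v):
--     if v == 0:
--         return 128
--     if v == 2:
--         return 768
--     return 512
--
--
-- def make_list_fifth(false_count_list):
--     # Stable sort of (value, index) pairs groups the indices by value 0..3
--     # while keeping the original order inside each group; one scan with a
--     # per-group counter then applies each group's cap.
--     pairs = sorted(((v, i) for i, v in enumerate(false_count_list) if 0 <= v <= 3),
--                    key=lambda p: p[0])
--     out = []
--     prev = None
--     seen = 0
--     for v, i in pairs: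
--         if prev != v:
--             prev = v
--             seen = 0
--         if seen < _cap(v):
--             out.append(i)
--         seen += 1
--     return out
-- ===== Notes on version B (the rewrite author's own statement) =====
-- stated objective: alternative
-- what changed: Replaces A's single bucketing pass into four index lists with a sort-then-scan algorithm: stable-sort the (value, index) pairs for values 0..3 by value, then one scan with a per-group counter applies each value's cap while appending indices.
import Mathlib
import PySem

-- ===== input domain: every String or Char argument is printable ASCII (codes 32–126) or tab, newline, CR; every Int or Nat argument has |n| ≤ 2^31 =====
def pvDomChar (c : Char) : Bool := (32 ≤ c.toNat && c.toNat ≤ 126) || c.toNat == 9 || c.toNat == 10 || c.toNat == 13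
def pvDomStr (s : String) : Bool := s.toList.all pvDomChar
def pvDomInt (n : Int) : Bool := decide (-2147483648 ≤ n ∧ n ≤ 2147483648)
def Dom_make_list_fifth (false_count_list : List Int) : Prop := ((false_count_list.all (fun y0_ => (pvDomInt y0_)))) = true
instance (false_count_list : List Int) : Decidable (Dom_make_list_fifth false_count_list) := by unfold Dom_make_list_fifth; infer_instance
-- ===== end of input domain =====

-- B replaces A's single bucketing pass with a stable sort of (value, index)
-- pairs followed by one capped scan (alternative algorithm; same output).

-- ===== PORT A =====
-- one loop step of A: the four `if` appends in order, then iter += 1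
def mlfStep (s : List Int × List Int × List Int × List Int × Int) (i : Int) :
    List Int × List Int × List Int × List Int × Int :=
  let z := if i == 0 then s.1 ++ [s.2.2.2.2] else s.1
  let o := if i == 1 then s.2.1 ++ [s.2.2.2.2] else s.2.1
  let t := if i == 2 then s.2.2.1 ++ [s.2.2.2.2] else s.2.2.1
  let th := if i == 3 then s.2.2.2.1 ++ [s.2.2.2.2] else s.2.2.2.1
  (z, o, t, th, s.2.2.2.2 + 1)

def make_list_fifth (false_count_list : List Int) : List Int :=
  let st := false_count_list.foldl mlfStep ([], [], [], [], 0)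
  let remove_zero := PySem.List.slice st.1 (some 0) (some 128)
  let remove_one := PySem.List.slice st.2.1 none (some 512)
  let remove_two := PySem.List.slice st.2.2.1 none (some 768)
  let remove_three := PySem.List.slice st.2.2.2.1 none (some 512)
  remove_zero ++ remove_one ++ remove_two ++ remove_three

-- ===== PORT B =====
-- _cap(v)
def mlfCap (v : Int) : Int := if v == 0 then 128 else if v == 2 then 768 else 512

-- sorted(((v, i) for i, v in enumerate(xs) if 0 <= v <= 3), key=lambda p: p[0])
def mlfPairs (xs : List Int) : List (Int × Int) :=
  PySem.List.sorted
    (((PySem.List.enumerate xs 0).filter (fun p => decide (0 ≤ p.2 ∧ p.2 ≤ 3))).map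
      (fun p => (p.2, p.1)))
    (fun p => p.1) false

-- one iteration of B's scan: state (out, prev, seen)
def mlfScan (s : List Int × Option Int × Int) (p : Int × Int) :
    List Int × Option Int × Int :=
  let ps := if s.2.1 ≠ some p.1 then (some p.1, (0 : Int)) else s.2
  let out := if ps.2 < mlfCap p.1 then s.1 ++ [p.2] else s.1
  (out, ps.1, ps.2 + 1)

def make_list_fifth_alt (false_count_list : List Int) : List Int :=
  ((mlfPairs false_count_list).foldl mlfScan ([], none, 0)).1

-- ===== PRECONDITION & SPEC =====
def Spec_make_list_fifth (false_count_list : List Int) (out : List Int) : Prop := out = make_list_fifth_alt false_count_list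
instance (false_count_list : List Int) (out : List Int) : Decidable (Spec_make_list_fifth false_count_list out) := by unfold Spec_make_list_fifth; infer_instance

-- ===== CLAIM (what is proved, stated in full; the proofs are below) =====
def Claim_equal_make_list_fifth : Prop := ∀ (false_count_list : List Int), Dom_make_list_fifth false_count_list → Spec_make_list_fifth false_count_list (make_list_fifth false_count_list)

-- ===== LEMMAS AND PROOFS =====
-- indices of elements equal to k (what A's bucket for k holds)
def mlfPick (l : List Int) (k : Int) : List Int :=
  ((PySem.List.enumerate l 0).filter (fun p => p.2 == k)).map (·.1)

-- (k, index) pairs for elements equal to k (one sorted group on B's side)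
def mlfGrp (l : List Int) (k : Int) : List (Int × Int) :=
  ((PySem.List.enumerate l 0).filter (fun p => p.2 == k)).map (fun p => (p.2, p.1))

-- ---- A side: the bucketing fold computes the four picks ----
def mlfPickFrom (l : List Int) (it k : Int) : List Int :=
  ((PySem.List.enumerate l it).filter (fun p => p.2 == k)).map (·.1)

theorem mlf_foldl_invariant (l : List Int) :
    ∀ (z o t th : List Int) (it : Int),
      l.foldl mlfStep (z, o, t, th, it) =
        (z ++ mlfPickFrom l it 0, o ++ mlfPickFrom l it 1,
         t ++ mlfPickFrom l it 2, th ++ mlfPickFrom l it 3, it + l.length) := by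
  induction l with
  | nil => intro z o t th it; simp [mlfPickFrom, PySem.List.enumerate_nil]
  | cons x xs ih =>
    intro z o t th it
    simp only [List.foldl_cons, mlfStep, ih]
    simp [mlfPickFrom, PySem.List.enumerate_cons, List.filter_cons]
    refine ⟨?_, ?_, ?_, ?_, by omega⟩ <;>
      · split_ifs <;> simp_all

-- ---- B side, part 1: the stable sort by value groups the pairs ----
theorem mlf_insertBy_grouped (before : Int × Int → Int × Int → Bool) (x : Int × Int)
    (pre suf : List (Int × Int)) (h1 : ∀ y ∈ pre, before x y = false)
    (h2 : ∀ y ∈ suf, before x y = true) :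
    PySem.List.insertBy before x (pre ++ suf) = pre ++ x :: suf := by
  induction pre with
  | nil =>
    cases suf with
    | nil => simp [PySem.List.insertBy]
    | cons s ss => simp [PySem.List.insertBy, h2 s (by simp)]
  | cons p ps ih =>
    simp only [List.cons_append, PySem.List.insertBy, h1 p (by simp)]
    simp only [Bool.false_eq_true, if_false]
    rw [ih (fun y hy => h1 y (by simp [hy]))]

def mlfGrpf (ps : List (Int × Int)) (k : Int) : List (Int × Int) :=
  ps.filter (fun p => p.1 == k)

theorem mlf_foldl_insertBy_groups (ps : List (Int × Int)) :
    ∀ (qs : List (Int × Int)), (∀ p ∈ ps, 0 ≤ p.1 ∧ p.1 ≤ 3) →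
      ps.foldl (fun acc x => PySem.List.insertBy (fun a b => decide (a.1 < b.1)) x acc)
        (mlfGrpf qs 0 ++ mlfGrpf qs 1 ++ mlfGrpf qs 2 ++ mlfGrpf qs 3) =
      mlfGrpf (qs ++ ps) 0 ++ mlfGrpf (qs ++ ps) 1 ++ mlfGrpf (qs ++ ps) 2 ++ mlfGrpf (qs ++ ps) 3 := by
  induction ps with
  | nil => intro qs _; simp
  | cons x rest ih =>
    intro qs h
    simp only [List.foldl_cons]
    have hx := h x (by simp)
    have hmem : ∀ (j : Int) (y : Int × Int), y ∈ mlfGrpf qs j → y.1 = j := by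
      intro j y hy
      have := List.of_mem_filter hy
      simpa using this
    have hstep : PySem.List.insertBy (fun a b => decide (a.1 < b.1)) x
        (mlfGrpf qs 0 ++ mlfGrpf qs 1 ++ mlfGrpf qs 2 ++ mlfGrpf qs 3) =
        mlfGrpf (qs ++ [x]) 0 ++ mlfGrpf (qs ++ [x]) 1 ++ mlfGrpf (qs ++ [x]) 2 ++ mlfGrpf (qs ++ [x]) 3 := by
      by_cases h0 : x.1 = 0
      · rw [show mlfGrpf qs 0 ++ mlfGrpf qs 1 ++ mlfGrpf qs 2 ++ mlfGrpf qs 3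
              = mlfGrpf qs 0 ++ (mlfGrpf qs 1 ++ mlfGrpf qs 2 ++ mlfGrpf qs 3) by simp,
           mlf_insertBy_grouped _ x _ _
             (by intro y hy; have := hmem 0 y hy; simp [h0, this])
             (by intro y hy
                 simp only [List.mem_append] at hy
                 rcases hy with (hy | hy) | hy
                 · have := hmem 1 y hy; simp [h0, this]
                 · have := hmem 2 y hy; simp [h0, this]
                 · have := hmem 3 y hy; simp [h0, this])]
        simp [mlfGrpf, List.filter_append, h0]
      · by_cases h1 : x.1 = 1
        · rw [show mlfGrpf qs 0 ++ mlfGrpf qs 1 ++ mlfGrpf qs 2 ++ mlfGrpf qs 3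
                = (mlfGrpf qs 0 ++ mlfGrpf qs 1) ++ (mlfGrpf qs 2 ++ mlfGrpf qs 3) by simp,
             mlf_insertBy_grouped _ x _ _
               (by intro y hy
                   simp only [List.mem_append] at hy
                   rcases hy with hy | hy
                   · have := hmem 0 y hy; simp [h1, this]
                   · have := hmem 1 y hy; simp [h1, this])
               (by intro y hy
                   simp only [List.mem_append] at hy
                   rcases hy with hy | hy
                   · have := hmem 2 y hy; simp [h1, this]
                   · have := hmem 3 y hy; simp [h1, this])]
          simp [mlfGrpf, List.filter_append, h1]
        · by_cases h2 : x.1 = 2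
          · rw [show mlfGrpf qs 0 ++ mlfGrpf qs 1 ++ mlfGrpf qs 2 ++ mlfGrpf qs 3
                  = (mlfGrpf qs 0 ++ mlfGrpf qs 1 ++ mlfGrpf qs 2) ++ mlfGrpf qs 3 by simp,
               mlf_insertBy_grouped _ x _ _
                 (by intro y hy
                     simp only [List.mem_append] at hy
                     rcases hy with (hy | hy) | hy
                     · have := hmem 0 y hy; simp [h2, this]
                     · have := hmem 1 y hy; simp [h2, this]
                     · have := hmem 2 y hy; simp [h2, this])
                 (by intro y hy; have := hmem 3 y hy; simp [h2, this])]
            simp [mlfGrpf, List.filter_append, h2]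
          · have h3 : x.1 = 3 := by omega
            rw [show mlfGrpf qs 0 ++ mlfGrpf qs 1 ++ mlfGrpf qs 2 ++ mlfGrpf qs 3
                    = (mlfGrpf qs 0 ++ mlfGrpf qs 1 ++ mlfGrpf qs 2 ++ mlfGrpf qs 3) ++ [] by simp,
                 mlf_insertBy_grouped _ x _ _
                   (by intro y hy
                       simp only [List.mem_append] at hy
                       rcases hy with ((hy | hy) | hy) | hy
                       · have := hmem 0 y hy; simp [h3, this]
                       · have := hmem 1 y hy; simp [h3, this]
                       · have := hmem 2 y hy; simp [h3, this]
                       · have := hmem 3 y hy; simp [h3, this])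
                   (by intro y hy; simp at hy)]
            simp [mlfGrpf, List.filter_append, h3]
    rw [hstep, ih (qs ++ [x]) (fun p hp => h p (by simp [hp]))]
    simp

theorem mlf_sorted_groups (ps : List (Int × Int))
    (h : ∀ p ∈ ps, 0 ≤ p.1 ∧ p.1 ≤ 3) :
    PySem.List.sorted ps (fun p => p.1) false =
      mlfGrpf ps 0 ++ mlfGrpf ps 1 ++ mlfGrpf ps 2 ++ mlfGrpf ps 3 := by
  rw [PySem.List.sorted_eq_foldl_insertBy]
  have := mlf_foldl_insertBy_groups ps [] h
  simpa [mlfGrpf] using this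

-- ---- B side, part 2: the capped scan over one uniform-value group ----
theorem mlf_cap_pos (k : Int) : 0 < mlfCap k := by
  unfold mlfCap; split_ifs <;> norm_num

theorem mlf_scan_mid (k : Int) (gs : List (Int × Int)) (hall : ∀ p ∈ gs, p.1 = k) :
    ∀ (out : List Int) (c : Int),
      gs.foldl mlfScan (out, some k, c) =
        (out ++ (gs.map (·.2)).take ((mlfCap k - c).toNat), some k, c + gs.length) := by
  induction gs with
  | nil => intro out c; simp
  | cons p t ih =>
    intro out c
    have hp : p.1 = k := hall p (by simp)
    simp only [List.foldl_cons]
    have hscan : mlfScan (out, some k, c) p =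
        (if c < mlfCap k then out ++ [p.2] else out, some k, c + 1) := by
      simp [mlfScan, hp]
    rw [hscan, ih (fun q hq => hall q (by simp [hq]))]
    by_cases hc : c < mlfCap k
    · have : (mlfCap k - c).toNat = (mlfCap k - (c + 1)).toNat + 1 := by omega
      simp [hc, this, List.take_succ_cons]
      omega
    · have h1 : (mlfCap k - c).toNat = 0 := by omega
      have h2 : (mlfCap k - (c + 1)).toNat = 0 := by omega
      simp [hc, h1, h2]
      omega

theorem mlf_scan_group (k : Int) (gs : List (Int × Int)) (hall : ∀ p ∈ gs, p.1 = k)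
    (out : List Int) (prev₀ : Option Int) (c : Int)
    (hne : ∀ m, prev₀ = some m → m < k) :
    ∃ (prev' : Option Int) (c' : Int),
      gs.foldl mlfScan (out, prev₀, c) =
        (out ++ (gs.map (·.2)).take (mlfCap k).toNat, prev', c') ∧
      ∀ m, prev' = some m → m ≤ k := by
  cases gs with
  | nil =>
    refine ⟨prev₀, c, by simp, fun m hm => le_of_lt (hne m hm)⟩
  | cons p t =>
    have hp : p.1 = k := hall p (by simp)
    have hprev : prev₀ ≠ some p.1 := by
      intro hEq
      have := hne p.1 hEq
      omega
    have hprev' : prev₀ ≠ some k := by rw [← hp]; exact hprev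
    have hscan : mlfScan (out, prev₀, c) p = (out ++ [p.2], some k, 1) := by
      simp only [mlfScan, hp]
      rw [if_pos hprev']
      simp [mlf_cap_pos k]
    refine ⟨some k, 1 + t.length, ?_, by intro m hm; simp at hm; omega⟩
    simp only [List.foldl_cons, hscan]
    rw [mlf_scan_mid k t (fun q hq => hall q (by simp [hq]))]
    have hcap : (mlfCap k).toNat = (mlfCap k - 1).toNat + 1 := by
      have := mlf_cap_pos k; omega
    rw [hcap]
    simp [List.take_succ_cons]

-- ---- assembling both sides ----
theorem mlf_grp_all (l : List Int) (k : Int) : ∀ p ∈ mlfGrp l k, p.1 = k := by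
  intro p hp
  simp only [mlfGrp, List.mem_map] at hp
  obtain ⟨q, hq, rfl⟩ := hp
  have := List.of_mem_filter hq
  simpa using this

theorem mlf_grp_snd (l : List Int) (k : Int) :
    (mlfGrp l k).map (·.2) = mlfPick l k := by
  simp [mlfGrp, mlfPick, List.map_map]

theorem mlf_pairs_eq_groups (l : List Int) :
    mlfPairs l = mlfGrp l 0 ++ mlfGrp l 1 ++ mlfGrp l 2 ++ mlfGrp l 3 := by
  unfold mlfPairs
  rw [mlf_sorted_groups]
  · have hg : ∀ k : Int, 0 ≤ k → k ≤ 3 →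
        mlfGrpf (((PySem.List.enumerate l 0).filter
            (fun p => decide (0 ≤ p.2 ∧ p.2 ≤ 3))).map (fun p => (p.2, p.1))) k
          = mlfGrp l k := by
      intro k hk0 hk3
      unfold mlfGrpf mlfGrp
      rw [List.filter_map, List.filter_filter]
      congr 1
      apply List.filter_congr
      intro p _
      simp only [Function.comp]
      by_cases hpk : p.2 = k
      · simp [hpk]; omega
      · simp [hpk]
    rw [hg 0 (by norm_num) (by norm_num), hg 1 (by norm_num) (by norm_num),
        hg 2 (by norm_num) (by norm_num), hg 3 (by norm_num) (by norm_num)]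
  · intro p hp
    simp only [List.mem_map] at hp
    obtain ⟨q, hq, rfl⟩ := hp
    have := List.of_mem_filter hq
    simpa using this

-- ===== VERDICT (by name: the statement is the Claim_ definition above) =====
theorem make_list_fifth_spec : Claim_equal_make_list_fifth := by
  intro l _
  show _ = _
  -- A side: four buckets, then slices = takes
  have hA : make_list_fifth l =
      (mlfPick l 0).take 128 ++ (mlfPick l 1).take 512 ++
        (mlfPick l 2).take 768 ++ (mlfPick l 3).take 512 := by
    simp only [make_list_fifth, mlf_foldl_invariant]
    have hpick : ∀ k, mlfPickFrom l 0 k = mlfPick l k := by intro k; rfl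
    simp [hpick, PySem.List.slice_zero_start, PySem.List.slice_to]
  -- B side: sorted groups, then the capped scan takes each group's prefix
  have hB : make_list_fifth_alt l =
      (mlfPick l 0).take 128 ++ (mlfPick l 1).take 512 ++
        (mlfPick l 2).take 768 ++ (mlfPick l 3).take 512 := by
    unfold make_list_fifth_alt
    rw [mlf_pairs_eq_groups, List.foldl_append, List.foldl_append, List.foldl_append]
    obtain ⟨p0, c0, h0, hp0⟩ :=
      mlf_scan_group 0 (mlfGrp l 0) (mlf_grp_all l 0) [] none 0 (by simp)
    rw [h0]
    obtain ⟨p1, c1, h1, hp1⟩ :=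
      mlf_scan_group 1 (mlfGrp l 1) (mlf_grp_all l 1) _ p0 c0
        (by intro m hm; have := hp0 m hm; omega)
    rw [h1]
    obtain ⟨p2, c2, h2, hp2⟩ :=
      mlf_scan_group 2 (mlfGrp l 2) (mlf_grp_all l 2) _ p1 c1
        (by intro m hm; have := hp1 m hm; omega)
    rw [h2]
    obtain ⟨p3, c3, h3, _⟩ :=
      mlf_scan_group 3 (mlfGrp l 3) (mlf_grp_all l 3) _ p2 c2
        (by intro m hm; have := hp2 m hm; omega)
    rw [h3]
    simp [mlf_grp_snd, mlfCap]
  rw [hA, hB]
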